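-- pv_equiv track=rewrite | github.com/gbvolkov/bot_platform | agents/theodor_agent/store_artifacts.py | _has_closing_marker
-- ===== SOURCE A (Python) =====
-- _MARKER_SPECS = {
--     "spoiler": {"open": '<span class="spoiler">', "close": "</span>", "literal": "||"},
--     "underline": {"open": "<u>", "close": "</u>", "literal": "__"},
--     "bold": {"open": "**", "close": "**", "literal": "*"},
--     "italic": {"open": "_", "close": "_", "literal": "_"},
--     "strike": {"open": "~~", "close": "~~", "literal": "~"},
-- }
--
-- def _has_closing_marker(text: str, start: int, marker: str) -> bool:
--     literal = _MARKER_SPECS[marker]["literal"]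
--     length = len(literal)
--     idx = start
--     size = len(text)
--     while idx < size:
--         ch = text[idx]
--         if ch == "\\":
--             idx += 2
--             continue
--         if length == 2 and text.startswith(literal, idx):
--             return True
--         if length == 1 and ch == literal:
--             return True
--         idx += 1
--     return False
-- ===== SOURCE B (Python) =====
-- _MARKER_SPECS = {
--     "spoiler": {"open": '<span class="spoiler">', "close": "</span>", "literal": "||"},
--     "underline": {"open": "<u>", "close": "</u>", "literal": "__"},
--     "bold": {"open": "**", "close": "**", "literal": "*"},
--     "italic": {"open": "_", "close": "_", "literal": "_"},
--     "strike": {"open": "~~", "close": "~~", "literal": "~"},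
-- }
--
-- def _has_closing_marker(text: str, start: int, marker: str) -> bool:
--     # Jump-based scan: instead of stepping a cursor one character at a time,
--     # find the next literal occurrence and the next backslash; decide or jump.
--     literal = _MARKER_SPECS[marker]["literal"]
--     idx = start
--     while True:
--         m = text.find(literal, idx)
--         if m == -1:
--             return False
--         b = text.find("\\", idx)
--         if b == -1 or b > m:
--             return True
--         idx = b + 2
-- ===== Notes on version B (the rewrite author's own statement) =====
-- stated objective: alternative
-- what changed: replaces A's one-character-at-a-time cursor loop (with separate branches for length-1 and length-2 literals) by a jump scan that repeatedly locates the next literal occurrence and the next backslash with str.find and either decides or jumps past the escape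
-- outside the precondition, e.g. on _has_closing_marker('_x', -1, 'italic'): A returns True, B returns False
import Mathlib
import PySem

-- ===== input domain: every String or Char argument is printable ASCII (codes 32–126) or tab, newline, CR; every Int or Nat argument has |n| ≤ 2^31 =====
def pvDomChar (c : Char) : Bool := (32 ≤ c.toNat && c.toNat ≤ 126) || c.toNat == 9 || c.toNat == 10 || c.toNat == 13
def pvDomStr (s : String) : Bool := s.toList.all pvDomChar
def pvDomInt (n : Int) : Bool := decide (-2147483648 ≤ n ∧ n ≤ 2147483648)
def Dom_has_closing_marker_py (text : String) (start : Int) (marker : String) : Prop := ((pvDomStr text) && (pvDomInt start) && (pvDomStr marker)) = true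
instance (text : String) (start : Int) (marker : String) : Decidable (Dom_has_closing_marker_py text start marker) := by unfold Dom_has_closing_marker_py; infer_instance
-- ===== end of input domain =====

-- B replaces A's one-character-at-a-time cursor loop by a jump scan (find next
-- literal occurrence / next backslash, decide or jump past the escape); return
-- values agree on Pre_ (known marker, nonnegative start).

-- ===== PORT A =====
-- _MARKER_SPECS (dict of dicts, insertion order)
def pvMarkerSpecs : PySem.Dict String (PySem.Dict String String) :=
  PySem.Dict.ofList
    [ ("spoiler", PySem.Dict.ofList [("open", "<span class=\"spoiler\">"), ("close", "</span>"), ("literal", "||")]),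
      ("underline", PySem.Dict.ofList [("open", "<u>"), ("close", "</u>"), ("literal", "__")]),
      ("bold", PySem.Dict.ofList [("open", "**"), ("close", "**"), ("literal", "*")]),
      ("italic", PySem.Dict.ofList [("open", "_"), ("close", "_"), ("literal", "_")]),
      ("strike", PySem.Dict.ofList [("open", "~~"), ("close", "~~"), ("literal", "~")]) ]

-- A's 'while idx < size' loop, one character at a time.
-- text.startswith(literal, idx) is ported as startswith on the slice text[idx:]
-- (exact for idx ≥ 0, the only values the loop reaches under Pre_).
def hcLoopA (cs lit : List Char) (len : Nat) (idx : Int) : Bool :=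
  if _h : idx < (cs.length : Int) then
    match PySem.List.pyGet? cs idx with
    | none => false  -- Python raises IndexError here (idx < -size; unreachable under Pre_)
    | some ch =>
      if ch = '\\' then hcLoopA cs lit len (idx + 2)
      else if len = 2 && PySem.Chars.startswith (PySem.List.slice cs (some idx) none) lit then true
      else if len = 1 && ([ch] == lit) then true
      else hcLoopA cs lit len (idx + 1)
  else false
termination_by ((cs.length : Int) - idx).toNat
decreasing_by all_goals omega

def has_closing_marker_py (text : String) (start : Int) (marker : String) : Bool :=
  match PySem.Dict.get? pvMarkerSpecs marker with
  | none => false  -- Python raises KeyError here (unknown marker; outside Pre_)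
  | some spec =>
    match PySem.Dict.get? spec "literal" with
    | none => false  -- unreachable: every spec carries a "literal"
    | some literal => hcLoopA text.toList literal.toList literal.toList.length start

-- ===== PORT B =====
-- B's jump loop: m = text.find(literal, idx); b = text.find('\\', idx);
-- return False if no literal, True if the first backslash is after it,
-- else jump to b + 2.  Fuel only makes the loop total (idx grows by ≥ 2
-- per iteration, so length + 1 iterations are never exhausted).
def hcLoopB (cs lit : List Char) (fuel : Nat) (idx : Int) : Bool :=
  match fuel with
  | 0 => false
  | fuel + 1 =>
    let m := PySem.Chars.findFrom cs lit idx none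
    if m = -1 then false
    else
      let b := PySem.Chars.findFrom cs ['\\'] idx none
      if b = -1 || decide (m < b) then true
      else hcLoopB cs lit fuel (b + 2)

def has_closing_marker_py_alt (text : String) (start : Int) (marker : String) : Bool :=
  match PySem.Dict.get? pvMarkerSpecs marker with
  | none => false  -- unknown marker (outside Pre_)
  | some spec =>
    match PySem.Dict.get? spec "literal" with
    | none => false
    | some literal => hcLoopB text.toList literal.toList (text.toList.length + 1) start

-- ===== PRECONDITION & SPEC =====
-- Pre_ restricts to the natural domain: a marker key of _MARKER_SPECS (A raises
-- KeyError otherwise) and a nonnegative scan position; on negative start A's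
-- value comes from Python's negative-index wraparound while B's str.find clamps,
-- so negative start is excluded as outside the natural domain.
def Pre_has_closing_marker_py (text : String) (start : Int) (marker : String) : Prop :=
  (marker = "spoiler" ∨ marker = "underline" ∨ marker = "bold" ∨ marker = "italic" ∨ marker = "strike") ∧ 0 ≤ start
instance (text : String) (start : Int) (marker : String) : Decidable (Pre_has_closing_marker_py text start marker) := by unfold Pre_has_closing_marker_py; infer_instance

def pvWitness_has_closing_marker_py : String × Int × String := ("a\\||b||", 0, "spoiler")

def Spec_has_closing_marker_py (text : String) (start : Int) (marker : String) (out : Bool) : Prop := out = has_closing_marker_py_alt text start marker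
instance (text : String) (start : Int) (marker : String) (out : Bool) : Decidable (Spec_has_closing_marker_py text start marker out) := by unfold Spec_has_closing_marker_py; infer_instance

-- ===== CLAIM (what is proved, stated in full; the proofs are below) =====
def Claim_equal_has_closing_marker_py : Prop := ∀ (text : String) (start : Int) (marker : String), Dom_has_closing_marker_py text start marker → Pre_has_closing_marker_py text start marker → Spec_has_closing_marker_py text start marker (has_closing_marker_py text start marker)

-- ===== LEMMAS AND PROOFS =====

-- A's loop, unfolded one step at a natural position k < |cs|
theorem hcLoopA_step (cs lit : List Char) (L k : Nat) (hk : k < cs.length) :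
    hcLoopA cs lit L (k : Int) =
      if cs[k] = '\\' then hcLoopA cs lit L ((k + 2 : Nat) : Int)
      else if L = 2 && PySem.Chars.startswith (cs.drop k) lit then true
      else if L = 1 && ([cs[k]] == lit) then true
      else hcLoopA cs lit L ((k + 1 : Nat) : Int) := by
  rw [hcLoopA]
  simp [hk, PySem.List.slice_from_natCast]

theorem hcLoopA_stop (cs lit : List Char) (L k : Nat) (hk : cs.length ≤ k) :
    hcLoopA cs lit L (k : Int) = false := by
  rw [hcLoopA]
  simp
  omega

-- characterisation of A's per-position check (lit of length 1 or 2, at k < |cs|)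
theorem hc_check_iff (cs lit : List Char) (k : Nat) (hk : k < cs.length)
    (hL : lit.length = 1 ∨ lit.length = 2) :
    ((lit.length = 2 && PySem.Chars.startswith (cs.drop k) lit)
      || (lit.length = 1 && ([cs[k]] == lit))) = true ↔ lit <+: cs.drop k := by
  rcases hL with h1 | h2
  · obtain ⟨c, rfl⟩ : ∃ c, lit = [c] := by
      cases lit with
      | nil => simp at h1
      | cons a t => cases t with
        | nil => exact ⟨a, rfl⟩
        | cons b u => simp at h1
    simp only [List.length_cons, List.length_nil]
    simp
    constructor
    · intro h
      rw [List.drop_eq_getElem_cons hk]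
      simp [h]
    · intro h
      rw [List.drop_eq_getElem_cons hk, List.cons_prefix_cons] at h
      exact h.1.symm
  · simp [h2, PySem.Chars.startswith_iff]

-- lit occurs nowhere at or after k → A's loop returns false
theorem hcLoopA_false (cs lit : List Char) (hL : lit.length = 1 ∨ lit.length = 2)
    (k : Nat) (h : ∀ j, k ≤ j → ¬ lit <+: cs.drop j) :
    hcLoopA cs lit lit.length (k : Int) = false := by
  by_cases hk : k < cs.length
  · rw [hcLoopA_step cs lit _ k hk]
    have hchk := hc_check_iff cs lit k hk hL
    have hno := h k le_rfl
    split_ifs with hbs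
    · exact hcLoopA_false cs lit hL (k + 2) (fun j hj => h j (by omega))
    all_goals simp_all
    exact hcLoopA_false cs lit hL (k + 1) (fun j hj => h j (by omega))
  · exact hcLoopA_stop cs lit _ k (by omega)
termination_by cs.length - k

-- lit occurs at m ≥ k and no backslash strictly before m (from k on) → A returns true
theorem hcLoopA_true (cs lit : List Char) (hL : lit.length = 1 ∨ lit.length = 2)
    (hbs : '\\' ∉ lit) (k m : Nat) (hkm : k ≤ m) (hocc : lit <+: cs.drop m)
    (hnb : ∀ j (hj : j < cs.length), k ≤ j → j < m → cs[j] ≠ '\\') :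
    hcLoopA cs lit lit.length (k : Int) = true := by
  have hmlen : m < cs.length := by
    by_contra h
    rw [List.drop_eq_nil_of_le (by omega)] at hocc
    have := List.prefix_nil.mp hocc
    subst this
    simp at hL
  have hklen : k < cs.length := by omega
  rw [hcLoopA_step cs lit _ k hklen]
  have hchk := hc_check_iff cs lit k hklen hL
  by_cases hkeq : k = m
  · subst hkeq
    have hhead : cs[k] ≠ '\\' := by
      intro hc
      apply hbs
      rw [List.drop_eq_getElem_cons hklen] at hocc
      cases lit with
      | nil => simp at hL
      | cons a t =>
        rw [List.cons_prefix_cons] at hocc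
        rw [hc] at hocc
        rw [hocc.1]
        simp
    rw [if_neg hhead]
    have : ((lit.length = 2 && PySem.Chars.startswith (cs.drop k) lit)
      || (lit.length = 1 && ([cs[k]] == lit))) = true := hchk.mpr hocc
    rcases Bool.or_eq_true_iff.mp this with h | h
    · simp [h]
    · simp only [h]
      split_ifs <;> simp_all
  · have hnbk : cs[k] ≠ '\\' := hnb k hklen le_rfl (by omega)
    rw [if_neg hnbk]
    by_cases hc : ((lit.length = 2 && PySem.Chars.startswith (cs.drop k) lit)
      || (lit.length = 1 && ([cs[k]] == lit))) = true
    · rcases Bool.or_eq_true_iff.mp hc with h | h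
      · simp [h]
      · simp only [h]
        split_ifs <;> simp_all
    · have h1 : (lit.length = 2 && PySem.Chars.startswith (cs.drop k) lit) = false := by
        cases hh : (lit.length = 2 && PySem.Chars.startswith (cs.drop k) lit) <;> simp_all
      have h2 : (lit.length = 1 && ([cs[k]] == lit)) = false := by
        cases hh : (lit.length = 1 && ([cs[k]] == lit)) <;> simp_all
      rw [h1, h2]
      simp only [if_false, Bool.false_eq_true]
      exact hcLoopA_true cs lit hL hbs (k + 1) m (by omega) hocc
        (fun j hj h1 h2 => hnb j hj (by omega) h2)
termination_by m - k

-- no backslash and no occurrence on [k, b), backslash at b → A skips from k to b + 2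
theorem hcLoopA_skip (cs lit : List Char) (hL : lit.length = 1 ∨ lit.length = 2)
    (k b : Nat) (hkb : k ≤ b) (hblen : b < cs.length) (hb : cs[b] = '\\')
    (hnb : ∀ j (hj : j < cs.length), k ≤ j → j < b → cs[j] ≠ '\\')
    (hno : ∀ j, k ≤ j → j < b → ¬ lit <+: cs.drop j) :
    hcLoopA cs lit lit.length (k : Int) = hcLoopA cs lit lit.length ((b + 2 : Nat) : Int) := by
  have hklen : k < cs.length := by omega
  rw [hcLoopA_step cs lit _ k hklen]
  by_cases hkeq : k = b
  · subst hkeq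
    rw [if_pos hb]
  · rw [if_neg (hnb k hklen le_rfl (by omega))]
    have hchk := hc_check_iff cs lit k hklen hL
    have hnok := hno k le_rfl (by omega)
    have h1 : (lit.length = 2 && PySem.Chars.startswith (cs.drop k) lit) = false := by
      cases hh : (lit.length = 2 && PySem.Chars.startswith (cs.drop k) lit) <;> simp_all
    have h2 : (lit.length = 1 && ([cs[k]] == lit)) = false := by
      cases hh : (lit.length = 1 && ([cs[k]] == lit)) <;> simp_all
    rw [h1, h2]
    simp only [if_false, Bool.false_eq_true]
    exact hcLoopA_skip cs lit hL (k + 1) b (by omega) hblen hb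
      (fun j hj ha hc => hnb j hj (by omega) hc) (fun j ha hc => hno j (by omega) hc)
termination_by b - k

-- findFrom with a start past the length is -1
theorem findFrom_gt_len (cs sub : List Char) (k : Nat) (hk : cs.length < k) :
    PySem.Chars.findFrom cs sub (k : Int) none = -1 := by
  simp only [PySem.Chars.findFrom]
  rw [if_pos]
  omega

-- an occurrence at j ≥ k is an infix of the k-suffix
theorem occ_infix (cs lit : List Char) (k j : Nat) (hkj : k ≤ j)
    (h : lit <+: cs.drop j) : lit <:+: cs.drop k := by
  have : cs.drop j = (cs.drop k).drop (j - k) := by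
    rw [List.drop_drop]
    congr 1
    omega
  rw [this] at h
  exact h.isInfix.trans (List.drop_suffix _ _).isInfix

-- the core equivalence of the two loops
theorem hcLoop_eq (cs lit : List Char)
    (hL : lit.length = 1 ∨ lit.length = 2) (hbs : '\\' ∉ lit) :
    ∀ (fuel k : Nat), cs.length + 2 ≤ k + 2 * fuel →
      hcLoopA cs lit lit.length (k : Int) = hcLoopB cs lit fuel (k : Int) := by
  intro fuel
  induction fuel with
  | zero =>
    intro k hfuel
    rw [hcLoopA_stop cs lit _ k (by omega)]
    rfl
  | succ fuel ih =>
    intro k hfuel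
    rw [hcLoopB]
    dsimp only
    by_cases hk : cs.length < k
    · rw [findFrom_gt_len cs lit k hk]
      simp only [if_true]
      exact hcLoopA_stop cs lit _ k (by omega)
    · have hk' : k ≤ cs.length := by omega
      by_cases hm : PySem.Chars.findFrom cs lit (k : Int) none = -1
      · simp only [hm, if_true]
        have hnoinfix := (PySem.Chars.findFrom_natCast_eq_neg_one_iff cs lit k hk').mp hm
        exact hcLoopA_false cs lit hL k
          (fun j hj hocc => hnoinfix (occ_infix cs lit k j hj hocc))
      · rw [if_neg hm]
        obtain ⟨hkm, hoccm, hminm⟩ := PySem.Chars.findFrom_natCast_spec cs lit k hk' hm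
        set m := PySem.Chars.findFrom cs lit (k : Int) none with hmdef
        by_cases hb : PySem.Chars.findFrom cs ['\\'] (k : Int) none = -1 ∨
            m < PySem.Chars.findFrom cs ['\\'] (k : Int) none
        · have : (PySem.Chars.findFrom cs ['\\'] (k : Int) none = -1 ||
              decide (m < PySem.Chars.findFrom cs ['\\'] (k : Int) none)) = true := by
            rcases hb with h | h <;> simp [h]
          rw [this]
          simp only [if_true]
          apply hcLoopA_true cs lit hL hbs k m.toNat (by omega) hoccm
          intro j hj hjk hjm hbsj
          have hpre : ['\\'] <+: cs.drop j := by
            rw [List.drop_eq_getElem_cons hj, hbsj]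
            simp
          rcases hb with h | h
          · exact (PySem.Chars.findFrom_natCast_eq_neg_one_iff cs ['\\'] k hk').mp h
              (occ_infix cs ['\\'] k j hjk hpre)
          · have hbne : PySem.Chars.findFrom cs ['\\'] (k : Int) none ≠ -1 := by omega
            obtain ⟨hkb, hoccb, hminb⟩ :=
              PySem.Chars.findFrom_natCast_spec cs ['\\'] k hk' hbne
            exact hminb j hjk (by omega) hpre
        · rw [not_or] at hb
          obtain ⟨hbne, hbm⟩ := hb
          have : (PySem.Chars.findFrom cs ['\\'] (k : Int) none = -1 ||
              decide (m < PySem.Chars.findFrom cs ['\\'] (k : Int) none)) = false := by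
            simp [hbne]
            omega
          rw [this]
          simp only [Bool.false_eq_true, if_false]
          obtain ⟨hkb, hoccb, hminb⟩ :=
            PySem.Chars.findFrom_natCast_spec cs ['\\'] k hk' hbne
          set b := PySem.Chars.findFrom cs ['\\'] (k : Int) none with hbdef
          have hblen : b.toNat < cs.length := by
            by_contra hc
            rw [List.drop_eq_nil_of_le (by omega)] at hoccb
            simp at hoccb
          have hbchar : cs[b.toNat] = '\\' := by
            rw [List.drop_eq_getElem_cons hblen] at hoccb
            rw [List.cons_prefix_cons] at hoccb
            exact hoccb.1.symm
          have hskip := hcLoopA_skip cs lit hL k b.toNat (by omega) hblen hbchar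
            (fun j hj hjk hjb hc => by
              have hpre : ['\\'] <+: cs.drop j := by
                rw [List.drop_eq_getElem_cons hj, hc]
                simp
              exact hminb j hjk hjb hpre)
            (fun j hjk hjb => hminm j hjk (by omega))
          rw [hskip]
          have hcast : (b + 2 : Int) = ((b.toNat + 2 : Nat) : Int) := by omega
          rw [hcast]
          exact ih (b.toNat + 2) (by omega)

-- ===== VERDICT (by name: the statement is the Claim_ definition above) =====
theorem has_closing_marker_py_spec : Claim_equal_has_closing_marker_py := by
  intro text start marker _hdom hpre
  obtain ⟨hmk, hstart⟩ := hpre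
  unfold Spec_has_closing_marker_py
  have hcast : start = ((start.toNat : Nat) : Int) := by omega
  rcases hmk with rfl | rfl | rfl | rfl | rfl
  · rw [hcast]
    exact hcLoop_eq text.toList "||".toList (by decide) (by decide)
      (text.toList.length + 1) start.toNat (by omega)
  · rw [hcast]
    exact hcLoop_eq text.toList "__".toList (by decide) (by decide)
      (text.toList.length + 1) start.toNat (by omega)
  · rw [hcast]
    exact hcLoop_eq text.toList "*".toList (by decide) (by decide)
      (text.toList.length + 1) start.toNat (by omega)
  · rw [hcast]
    exact hcLoop_eq text.toList "_".toList (by decide) (by decide)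
      (text.toList.length + 1) start.toNat (by omega)
  · rw [hcast]
    exact hcLoop_eq text.toList "~".toList (by decide) (by decide)
      (text.toList.length + 1) start.toNat (by omega)
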